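-- pv_equiv track=rewrite | github.com/pypi-data/pypi-mirror-46 | packages/ukbparse/ukbparse-0.20.0.tar.gz/ukbparse-0.20.0/ukbparse/config.py | sanitiseArgs
-- ===== SOURCE A (Python) =====
-- def sanitiseArgs(argv):
--     """Sanitises command-line arguments to work around a bug in ``argparse``.
--
--     The ``argparse`` module does not work with non-numeric optional argument
--     values that begin with a hyphen, as it thinks that they are argument names
--     (see https://bugs.python.org/issue9334).
--
--     This function searches for relevant optional argument names, and prepends
--     a space to their values to make sure that ``argparse`` doesn't fall over.
--
--     :arg argv: Command-line arguments
--     :returns:  Sanitised command-line arguments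
--     """
--     argv       = list(argv)
--     toSanitise = [( '-nv',           [1]),
--                   ('--na_values',    [1]),
--                   ( '-re',           [1, 2]),
--                   ('--recoding',     [1, 2]),
--                   ( '-cv',           [2]),
--                   ('--child_values', [2])]
--
--     for arg, idxs in toSanitise:
--
--         try:               argidx = argv.index(arg)
--         except ValueError: continue
--
--         for i in idxs:
--
--             i   = i + 1 + argidx
--             val = argv[i]
--
--             if val.startswith('-'):
--                 argv[i] = ' ' + val
--
--     return argv
-- ===== SOURCE B (Python) =====
-- def sanitiseArgs(argv):
--     """Sanitised copy of argv: prepends a space to hyphen-starting values of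
--     the known optional arguments (works around https://bugs.python.org/issue9334).
--
--     Computes the set of affected positions first, then rebuilds the argument
--     list in a single pass.
--     """
--     toSanitise = {'-nv':            [1],
--                   '--na_values':    [1],
--                   '-re':            [1, 2],
--                   '--recoding':     [1, 2],
--                   '-cv':            [2],
--                   '--child_values': [2]}
--
--     targets = set()
--     for flag, offsets in toSanitise.items():
--         if flag in argv:
--             base = argv.index(flag) + 1
--             for off in offsets:
--                 targets.add(base + off)
--
--     return [' ' + tok if i in targets and tok.startswith('-') else tok
--             for i, tok in enumerate(argv)]
-- ===== Notes on version B (the rewrite author's own statement) =====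
-- stated objective: idiomatic
-- what changed: Instead of mutating the argv copy flag-by-flag while re-scanning it with list.index, B first computes the set of target positions from the original argv and then rebuilds the list in one enumerate comprehension (no in-place mutation, no interleaving of lookups with writes).
import Mathlib
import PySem

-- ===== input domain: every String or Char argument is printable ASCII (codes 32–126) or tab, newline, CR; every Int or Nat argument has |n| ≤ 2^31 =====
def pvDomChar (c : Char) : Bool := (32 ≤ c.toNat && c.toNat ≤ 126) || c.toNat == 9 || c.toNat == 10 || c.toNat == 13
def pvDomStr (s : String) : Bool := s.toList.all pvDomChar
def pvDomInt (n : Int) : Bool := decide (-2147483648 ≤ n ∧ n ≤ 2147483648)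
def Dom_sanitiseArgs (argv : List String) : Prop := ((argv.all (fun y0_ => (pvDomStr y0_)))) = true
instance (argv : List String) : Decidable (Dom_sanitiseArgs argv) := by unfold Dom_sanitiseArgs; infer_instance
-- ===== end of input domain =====

-- B rebuilds the list in one pass from a precomputed set of target positions instead of mutating the copy
-- flag-by-flag while re-scanning it with list.index (objective: idiomatic; same cost).

-- ===== PORT A =====
-- the toSanitise table of A
def pvToSanitise : List (String × List Int) :=
  [("-nv", [1]), ("--na_values", [1]), ("-re", [1, 2]),
   ("--recoding", [1, 2]), ("-cv", [2]), ("--child_values", [2])]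

-- one body of A's inner loop: 'val = argv[i]; if val.startswith('-'): argv[i] = ' ' + val'.
-- pyGet? = none is Python's IndexError (those inputs are excluded by Pre_); ' ' + val is consing one char.
def pvSanStep (acc : List String) (i : Int) : List String :=
  match PySem.List.pyGet? acc i with
  | none => acc
  | some val =>
      if PySem.Str.startswith val "-" then
        PySem.List.pySetD acc i (String.ofList (' ' :: val.toList))
      else acc

-- one body of A's outer loop: 'try: argidx = argv.index(arg) except ValueError: continue; for i in idxs: …'
def pvSanFlag (acc : List String) (p : String × List Int) : List String :=
  match PySem.List.index? acc p.1 with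
  | none => acc
  | some argidx => p.2.foldl (fun a i => pvSanStep a (i + 1 + (argidx : Int))) acc

def sanitiseArgs (argv : List String) : List String :=
  pvToSanitise.foldl pvSanFlag argv

-- ===== PORT B =====
def pvToSanitiseB : PySem.Dict String (List Int) :=
  PySem.Dict.ofList
    [("-nv", [1]), ("--na_values", [1]), ("-re", [1, 2]),
     ("--recoding", [1, 2]), ("-cv", [2]), ("--child_values", [2])]

-- B's first loop body: 'if flag in argv: base = argv.index(flag) + 1; for off in offsets: targets.add(base + off)'
def pvAddTargets (argv : List String) (t : PySem.Set Int) (p : String × List Int) : PySem.Set Int :=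
  if argv.contains p.1 then
    match PySem.List.index? argv p.1 with
    | none => t
    | some k => p.2.foldl (fun t off => PySem.Set.add t ((k : Int) + 1 + off)) t
  else t

-- B's final comprehension: [' ' + tok if i in targets and tok.startswith('-') else tok for i, tok in enumerate(argv)]
def pvMask (argv : List String) (targets : PySem.Set Int) : List String :=
  (PySem.List.enumerate argv 0).map (fun q =>
    if PySem.Set.contains targets q.1 && PySem.Str.startswith q.2 "-" then
      String.ofList (' ' :: q.2.toList)
    else q.2)

def sanitiseArgs_alt (argv : List String) : List String :=
  pvMask argv ((PySem.Dict.items pvToSanitiseB).foldl (pvAddTargets argv) PySem.Set.empty)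

-- ===== PRECONDITION & SPEC =====
def pvFlagNames : List String :=
  ["-nv", "--na_values", "-re", "--recoding", "-cv", "--child_values"]

def pvPreOffs : List (String × List Nat) :=
  [("-nv", [1]), ("--na_values", [1]), ("-re", [1, 2]),
   ("--recoding", [1, 2]), ("-cv", [2]), ("--child_values", [2])]

-- Pre_ excludes inputs where a sanitised position i+1+argidx falls outside argv (A raises IndexError there)
-- and inputs where such a position holds one of the six flag names itself, on which A's value is an accident
-- of its mutate-while-re-scanning order.
def Pre_sanitiseArgs (argv : List String) : Prop :=
  (pvPreOffs.all (fun p =>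
    match argv.idxOf? p.1 with
    | none => true
    | some k => p.2.all (fun o =>
        match argv[k + 1 + o]? with
        | none => false
        | some t => !(pvFlagNames.contains t)))) = true
instance (argv : List String) : Decidable (Pre_sanitiseArgs argv) := by
  unfold Pre_sanitiseArgs; infer_instance

def pvWitness_sanitiseArgs : List String := ["-nv", "7", "x"]

def Spec_sanitiseArgs (argv : List String) (out : List String) : Prop := out = sanitiseArgs_alt argv
instance (argv : List String) (out : List String) : Decidable (Spec_sanitiseArgs argv out) := by
  unfold Spec_sanitiseArgs; infer_instance

-- ===== CLAIM (what is proved, stated in full; the proofs are below) =====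
def Claim_equal_sanitiseArgs : Prop :=
  ∀ (argv : List String), Dom_sanitiseArgs argv → Pre_sanitiseArgs argv →
    Spec_sanitiseArgs argv (sanitiseArgs argv)

-- ===== LEMMAS AND PROOFS =====

-- ' ' + s never equals one of the six flag names (they all start with '-')
theorem pvSp_ne_flag (f : String) (hf : f ∈ pvFlagNames) (l : List Char) :
    String.ofList (' ' :: l) ≠ f := by
  intro h
  have h' := congrArg String.toList h
  simp [pvFlagNames] at hf
  rcases hf with rfl | rfl | rfl | rfl | rfl | rfl <;> simp at h'

-- ' ' + s does not start with '-'
theorem pvSp_sw (l : List Char) :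
    PySem.Str.startswith (String.ofList (' ' :: l)) "-" = false := by
  simp [PySem.Str.startswith, PySem.Chars.startswith, List.isPrefixOf]

def pvMaskFrom (argv : List String) (targets : PySem.Set Int) (s : Int) : List String :=
  (PySem.List.enumerate argv s).map (fun q =>
    if PySem.Set.contains targets q.1 && PySem.Str.startswith q.2 "-" then
      String.ofList (' ' :: q.2.toList)
    else q.2)

theorem pvMask_eq_from (argv : List String) (T : PySem.Set Int) :
    pvMask argv T = pvMaskFrom argv T 0 := rfl

theorem pvMaskFrom_cons (a : String) (argv : List String) (T : PySem.Set Int) (s : Int) :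
    pvMaskFrom (a :: argv) T s =
      (if PySem.Set.contains T s && PySem.Str.startswith a "-" then
        String.ofList (' ' :: a.toList) else a) :: pvMaskFrom argv T (s + 1) := by
  simp only [pvMaskFrom, PySem.List.enumerate_cons, List.map_cons]

theorem pvMask_length (argv : List String) (T : PySem.Set Int) :
    (pvMask argv T).length = argv.length := by
  simp [pvMask, PySem.List.length_enumerate]

theorem pvMask_getElem? (argv : List String) (T : PySem.Set Int) (n : Nat) :
    (pvMask argv T)[n]? =
      argv[n]?.map (fun t =>
        if PySem.Set.contains T (n : Int) && PySem.Str.startswith t "-" then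
          String.ofList (' ' :: t.toList) else t) := by
  simp only [pvMask, List.getElem?_map, PySem.List.getElem?_enumerate]
  cases argv[n]? <;> simp

theorem pvMask_empty (argv : List String) : pvMask argv PySem.Set.empty = argv := by
  have : ∀ q : Int × String, q ∈ PySem.List.enumerate argv 0 →
      (if PySem.Set.contains PySem.Set.empty q.1 && PySem.Str.startswith q.2 "-" then
        String.ofList (' ' :: q.2.toList) else q.2) = q.2 := by
    intro q _
    simp [PySem.Set.contains, PySem.Set.empty]
  rw [pvMask, List.map_congr_left this]
  exact PySem.List.map_snd_enumerate argv 0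

-- index lookups on the masked list agree with lookups on the original list, for flag names,
-- as long as no masked position holds a flag name
theorem pvIdx_stable (f : String) (hf : f ∈ pvFlagNames) :
    ∀ (xs : List String) (s : Nat) (T : PySem.Set Int),
      (∀ (n : Nat) (t : String), xs[n]? = some t → ((s + n : Nat) : Int) ∈ T → t ∉ pvFlagNames) →
      (pvMaskFrom xs T (s : Int)).idxOf? f = xs.idxOf? f := by
  intro xs
  induction xs with
  | nil => intro s T _; rfl
  | cons a xs ih =>
      intro s T hT
      rw [pvMaskFrom_cons, List.idxOf?_cons, List.idxOf?_cons]
      have htail : (pvMaskFrom xs T ((s : Int) + 1)).idxOf? f = xs.idxOf? f := by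
        have hcast : ((s : Int) + 1) = ((s + 1 : Nat) : Int) := by push_cast; omega
        rw [hcast]
        exact ih (s + 1) T (by
          intro n t hn hm
          refine hT (n + 1) t (by simpa using hn) ?_
          have : ((s + 1 + n : Nat) : Int) = ((s + (n + 1) : Nat) : Int) := by push_cast; omega
          rw [← this]; exact hm)
      by_cases hc : (PySem.Set.contains T (s : Int) && PySem.Str.startswith a "-") = true
      · have hmem : ((s : Int)) ∈ T :=
          (PySem.Set.contains_iff T _).mp (Bool.and_elim_left hc)
        have hnot : a ∉ pvFlagNames := hT 0 a rfl (by simpa using hmem)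
        have h1 : (String.ofList (' ' :: a.toList) == f) = false := by
          simp only [beq_eq_false_iff_ne, ne_eq]; exact pvSp_ne_flag f hf a.toList
        have h2 : (a == f) = false := by
          simp only [beq_eq_false_iff_ne, ne_eq]; intro h; exact hnot (h ▸ hf)
        rw [if_pos hc, h1, h2]
        simp only [Bool.false_eq_true, if_false]
        rw [htail]
      · rw [if_neg hc]
        by_cases haf : (a == f) = true
        · rw [haf]; simp
        · simp only [Bool.not_eq_true] at haf
          rw [haf]
          simp only [Bool.false_eq_true, if_false]
          rw [htail]

-- one A-step at a valid position n turns the mask of T into the mask of T.add n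
theorem pvStep_mask (argv : List String) (T : PySem.Set Int) (n : Nat) (hn : n < argv.length) :
    pvSanStep (pvMask argv T) (n : Int) = pvMask argv (PySem.Set.add T (n : Int)) := by
  have hval : (pvMask argv T)[n]? =
      some (if PySem.Set.contains T (n : Int) && PySem.Str.startswith argv[n] "-" then
        String.ofList (' ' :: argv[n].toList) else argv[n]) := by
    rw [pvMask_getElem?, List.getElem?_eq_getElem hn]; rfl
  have hget : PySem.List.pyGet? (pvMask argv T) (n : Int) = (pvMask argv T)[n]? := by
    simp [PySem.List.pyGet?_natCast]
  unfold pvSanStep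
  rw [hget, hval]
  by_cases hc : PySem.Set.contains T (n : Int) = true
  · have hmem : ((n : Int)) ∈ T := (PySem.Set.contains_iff T _).mp hc
    have hTeq : PySem.Set.add T (n : Int) = T := by
      simp [PySem.Set.add, hmem]
    by_cases hw : PySem.Str.startswith argv[n] "-" = true
    · rw [hTeq]
      simp only [hc, hw, Bool.and_self, if_true, pvSp_sw, Bool.false_eq_true, if_false]
    · simp only [Bool.not_eq_true] at hw
      rw [hTeq]
      simp only [hc, hw, Bool.and_false, Bool.false_eq_true, if_false]
  · simp only [Bool.not_eq_true] at hc
    have hnm : ((n : Int)) ∉ T := by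
      intro h; have := (PySem.Set.contains_iff T ((n : Int))).mpr h; rw [hc] at this; cases this
    have hTeq : PySem.Set.add T (n : Int) = T ++ [(n : Int)] := by
      simp [PySem.Set.add, hnm]
    by_cases hw : PySem.Str.startswith argv[n] "-" = true
    · simp only [hc, Bool.false_and, Bool.false_eq_true, if_false, hw, if_true]
      rw [PySem.List.pySetD_natCast]
      apply List.ext_getElem?
      intro m
      rw [List.getElem?_set, pvMask_getElem?, pvMask_getElem?, hTeq]
      by_cases hmn : n = m
      · subst hmn
        rw [if_pos rfl, if_pos (by rw [pvMask_length]; exact hn)]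
        rw [List.getElem?_eq_getElem hn, Option.map_some]
        have hcm : PySem.Set.contains (T ++ [(n : Int)]) (n : Int) = true := by
          rw [PySem.Set.contains_iff]; simp
        rw [hcm, hw, Bool.and_self, if_pos rfl]
      · rw [if_neg hmn]
        cases hgm : argv[m]? with
        | none => rfl
        | some t =>
            rw [Option.map_some, Option.map_some]
            have hcm : PySem.Set.contains (T ++ [(n : Int)]) (m : Int) =
                PySem.Set.contains T (m : Int) := by
              simp only [PySem.Set.contains]
              have : ¬ ((m : Int) = (n : Int)) := by
                intro h; exact hmn (by exact_mod_cast h.symm)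
              simp [this]
            rw [hcm]
    · simp only [Bool.not_eq_true] at hw
      simp only [hc, hw, Bool.and_false, Bool.false_eq_true, if_false]
      apply List.ext_getElem?
      intro m
      rw [pvMask_getElem?, pvMask_getElem?, hTeq]
      cases hgm : argv[m]? with
      | none => rfl
      | some t =>
          rw [Option.map_some, Option.map_some]
          by_cases hmn : m = n
          · subst hmn
            have ht : t = argv[m] := by
              have := List.getElem?_eq_getElem (l := argv) (i := m)
                (by exact (List.getElem?_eq_some_iff.mp hgm).1)
              rw [this] at hgm; exact (Option.some_inj.mp hgm).symm
            rw [ht, hw, Bool.and_false, Bool.and_false]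
          · have hceq : PySem.Set.contains (T ++ [(n : Int)]) (m : Int) =
                PySem.Set.contains T (m : Int) := by
              simp only [PySem.Set.contains]
              have : ¬ ((m : Int) = (n : Int)) := by
                intro h; exact hmn (by exact_mod_cast h)
              simp [this]
            rw [hceq]

-- membership after B's inner add-fold
theorem pvMem_foldl_add (offs : List Int) (k : Nat) (T : PySem.Set Int) (j : Int) :
    j ∈ offs.foldl (fun t off => PySem.Set.add t ((k : Int) + 1 + off)) T ↔
      j ∈ T ∨ ∃ o ∈ offs, j = (k : Int) + 1 + o := by
  induction offs generalizing T with
  | nil => simp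
  | cons o offs ih =>
      simp only [List.foldl_cons, ih, PySem.Set.mem_add, List.mem_cons]
      constructor
      · rintro ((h | h) | ⟨o', ho', h⟩)
        · exact Or.inl h
        · exact Or.inr ⟨o, Or.inl rfl, h⟩
        · exact Or.inr ⟨o', Or.inr ho', h⟩
      · rintro (h | ⟨o', (rfl | ho'), h⟩)
        · exact Or.inl (Or.inl h)
        · exact Or.inl (Or.inr h)
        · exact Or.inr ⟨o', ho', h⟩

-- A's inner offset loop equals B's inner target-add loop, through the mask
theorem pvOffsets_fold (argv : List String) (offs : List Int) (k : Nat) (T : PySem.Set Int)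
    (h : ∀ o ∈ offs, ∃ n : Nat, o + 1 + (k : Int) = (n : Int) ∧ n < argv.length) :
    offs.foldl (fun a i => pvSanStep a (i + 1 + (k : Int))) (pvMask argv T) =
      pvMask argv (offs.foldl (fun t off => PySem.Set.add t ((k : Int) + 1 + off)) T) := by
  induction offs generalizing T with
  | nil => rfl
  | cons o offs ih =>
      obtain ⟨n, hon, hlt⟩ := h o (by simp)
      simp only [List.foldl_cons]
      rw [hon, pvStep_mask argv T n hlt]
      rw [show (k : Int) + 1 + o = (n : Int) from by omega]
      rw [show o + 1 + (k : Int) = (n : Int) from hon] at *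
      exact ih _ (fun o ho => h o (by simp [ho]))

def pvGoodT (argv : List String) (T : PySem.Set Int) : Prop :=
  ∀ j ∈ T, ∃ n : Nat, j = (n : Int) ∧ ∃ t, argv[n]? = some t ∧ t ∉ pvFlagNames

theorem pvMain (argv : List String) :
    ∀ (fl : List (String × List Int)) (T : PySem.Set Int),
      (∀ p ∈ fl, p.1 ∈ pvFlagNames ∧
        ∀ k : Nat, argv.idxOf? p.1 = some k → ∀ o ∈ p.2,
          ∃ n : Nat, o + 1 + (k : Int) = (n : Int) ∧
            ∃ t, argv[n]? = some t ∧ t ∉ pvFlagNames) →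
      pvGoodT argv T →
      fl.foldl pvSanFlag (pvMask argv T) = pvMask argv (fl.foldl (pvAddTargets argv) T) := by
  intro fl
  induction fl with
  | nil => intro T _ _; rfl
  | cons p fl ih =>
      intro T hfl hGood
      obtain ⟨hp1, hp2⟩ := hfl p (List.mem_cons_self)
      have hidx : PySem.List.index? (pvMask argv T) p.1 = argv.idxOf? p.1 := by
        rw [PySem.List.index?_eq_idxOf?, pvMask_eq_from]
        rw [show (0 : Int) = ((0 : Nat) : Int) from rfl]
        apply pvIdx_stable p.1 hp1 argv 0 T
        intro n t hn hm
        obtain ⟨n', hn', t', ht', hflag⟩ := hGood _ (by simpa using hm)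
        have : n' = n := by exact_mod_cast hn'.symm
        subst this
        rw [hn] at ht'
        have heq : t = t' := Option.some_inj.mp ht'
        rw [heq]; exact hflag
      simp only [List.foldl_cons]
      cases hk : argv.idxOf? p.1 with
      | none =>
          have hA : pvSanFlag (pvMask argv T) p = pvMask argv T := by
            unfold pvSanFlag; rw [hidx, hk]
          have hB : pvAddTargets argv T p = T := by
            unfold pvAddTargets
            rw [if_neg]
            intro h
            have hmem : p.1 ∈ argv := by simpa using h
            have hnone := List.idxOf?_eq_none_iff.mp hk
            exact hnone hmem
          rw [hA, hB]
          exact ih T (fun q hq => hfl q (List.mem_cons_of_mem _ hq)) hGood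
      | some k =>
          have hA : pvSanFlag (pvMask argv T) p =
              p.2.foldl (fun a i => pvSanStep a (i + 1 + (k : Int))) (pvMask argv T) := by
            unfold pvSanFlag; rw [hidx, hk]
          have hB : pvAddTargets argv T p =
              p.2.foldl (fun t off => PySem.Set.add t ((k : Int) + 1 + off)) T := by
            unfold pvAddTargets
            rw [if_pos, PySem.List.index?_eq_idxOf?, hk]
            have hmem : p.1 ∈ argv := by
              by_contra hno
              rw [List.idxOf?_eq_none_iff.mpr hno] at hk
              cases hk
            simpa using hmem
          rw [hA, hB]
          rw [pvOffsets_fold argv p.2 k T (by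
            intro o ho
            obtain ⟨n, hon, t, ht, _⟩ := hp2 k hk o ho
            exact ⟨n, hon, (List.getElem?_eq_some_iff.mp ht).1⟩)]
          apply ih
          · exact fun q hq => hfl q (List.mem_cons_of_mem _ hq)
          · intro j hj
            rcases (pvMem_foldl_add p.2 k T j).mp hj with h | ⟨o, ho, rfl⟩
            · exact hGood j h
            · obtain ⟨n, hon, t, ht, hflag⟩ := hp2 k hk o ho
              exact ⟨n, by omega, t, ht, hflag⟩

-- the per-flag facts that Pre_ provides
theorem pvPre_fact (argv : List String) (hpre : Pre_sanitiseArgs argv)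
    (f : String) (offs : List Nat) (hmem : (f, offs) ∈ pvPreOffs)
    (k : Nat) (hk : argv.idxOf? f = some k) (o : Nat) (ho : o ∈ offs) :
    ∃ t, argv[k + 1 + o]? = some t ∧ t ∉ pvFlagNames := by
  unfold Pre_sanitiseArgs at hpre
  rw [List.all_eq_true] at hpre
  have h1 := hpre _ hmem
  simp only at h1
  rw [hk] at h1
  rw [List.all_eq_true] at h1
  have h2 := h1 o ho
  simp only at h2
  cases hget : argv[k + 1 + o]? with
  | none => rw [hget] at h2; cases h2
  | some t =>
      rw [hget] at h2
      refine ⟨t, rfl, ?_⟩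
      simpa using h2

-- packaging pvPre_fact in the shape pvMain expects
theorem pvHyp (argv : List String) (hpre : Pre_sanitiseArgs argv)
    (f : String) (offs : List Nat) (hmem : (f, offs) ∈ pvPreOffs)
    (k : Nat) (hk : argv.idxOf? f = some k) (o : Nat) (ho : o ∈ offs) :
    ∃ n : Nat, ((o : Int)) + 1 + (k : Int) = (n : Int) ∧
      ∃ t, argv[n]? = some t ∧ t ∉ pvFlagNames :=
  ⟨k + 1 + o, by push_cast; omega, pvPre_fact argv hpre f offs hmem k hk o ho⟩

-- ===== VERDICT (by name: the statement is the Claim_ definition above) =====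
theorem sanitiseArgs_spec : Claim_equal_sanitiseArgs := by
  intro argv _ hpre
  unfold Spec_sanitiseArgs
  show sanitiseArgs argv = sanitiseArgs_alt argv
  unfold sanitiseArgs sanitiseArgs_alt
  have hitems : PySem.Dict.items pvToSanitiseB = pvToSanitise := by decide
  rw [hitems]
  have h0 : argv = pvMask argv PySem.Set.empty := (pvMask_empty argv).symm
  conv_lhs => rw [h0]
  apply pvMain
  · intro p hp
    fin_cases hp
    · exact ⟨by decide, fun k hk o ho => by
        fin_cases ho
        exact_mod_cast pvHyp argv hpre "-nv" [1] (by decide) k hk 1 (by decide)⟩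
    · exact ⟨by decide, fun k hk o ho => by
        fin_cases ho
        exact_mod_cast pvHyp argv hpre "--na_values" [1] (by decide) k hk 1 (by decide)⟩
    · exact ⟨by decide, fun k hk o ho => by
        fin_cases ho
        · exact_mod_cast pvHyp argv hpre "-re" [1, 2] (by decide) k hk 1 (by decide)
        · exact_mod_cast pvHyp argv hpre "-re" [1, 2] (by decide) k hk 2 (by decide)⟩
    · exact ⟨by decide, fun k hk o ho => by
        fin_cases ho
        · exact_mod_cast pvHyp argv hpre "--recoding" [1, 2] (by decide) k hk 1 (by decide)
        · exact_mod_cast pvHyp argv hpre "--recoding" [1, 2] (by decide) k hk 2 (by decide)⟩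
    · exact ⟨by decide, fun k hk o ho => by
        fin_cases ho
        exact_mod_cast pvHyp argv hpre "-cv" [2] (by decide) k hk 2 (by decide)⟩
    · exact ⟨by decide, fun k hk o ho => by
        fin_cases ho
        exact_mod_cast pvHyp argv hpre "--child_values" [2] (by decide) k hk 2 (by decide)⟩
  · intro j hj; cases hj
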